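-- pv_equiv track=rewrite | github.com/veritazz/Vault83 | scripts/conpack.py | convert_image
-- ===== SOURCE A (Python) =====
-- def convert_image(width, height, data, color):
-- 	# calculation size of resulting image in bytes
-- 	size = (width * ((height + 7) // 8 * 8)) // 8
-- 	f_data = []
-- 	for b in range(size):
-- 		f_data.append(0)
-- 	#
-- 	# Input image is a linear list of elements, each representing 1 pixel.
-- 	# The input data it organized width wise, e.g. each 'width' elements
-- 	# represent one row of the input image.
-- 	#
-- 	# Linear data organized in rows:
-- 	#    [ r1 ][ r2 ][ r3 ][ r4 ]
-- 	#
-- 	# Rows logically organized as image: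
-- 	#   [ r1 ]
-- 	#   [ r2 ]
-- 	#   [ r3 ]
-- 	#   [ r4 ]
-- 	#
--
-- 	#
-- 	# each byte of the output data can hold 8 rows (8 pixel)
-- 	# calculate how many rows fit into the height of the image
-- 	#
-- 	byte_rows = (height + 7) // 8
-- 	o = 0
--
-- 	#
-- 	# this loop converts the input data from row-major to column-major
-- 	# representation
-- 	#
-- 	for w in range(width):
-- 		for byte_row in range(byte_rows):
-- 			for h in range(8):
-- 				if (h + byte_row * 8) >= height:
-- 					break
-- 				c = data[(h + byte_row * 8) * width + w]
-- 				if c > color: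
-- 					f_data[o] = f_data[o] | (0x1 << h)
-- 			o += 1
--
-- 	return f_data
-- ===== SOURCE B (Python) =====
-- def convert_image(width, height, data, color):
--     byte_rows = (height + 7) // 8
--     if width <= 0 or byte_rows <= 0:
--         return []          # no pixels -> empty image
--     # staged pipeline: threshold pass -> split into rows, pad to a multiple of
--     # 8 rows -> transpose with zip -> pack each 8-bit column chunk into a byte
--     bits = [1 if v > color else 0 for v in data[:width * height]]
--     rows = [bits[r * width:(r + 1) * width] for r in range(height)]
--     rows += [[0] * width for _ in range(byte_rows * 8 - height)]
--     return [sum(bit << i for i, bit in enumerate(col[k:k + 8]))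
--             for col in zip(*rows)
--             for k in range(0, byte_rows * 8, 8)]
-- ===== Notes on version B (the rewrite author's own statement) =====
-- stated objective: alternative
-- what changed: Replaced A's in-place triple-nested bit-OR gather over an output buffer by a staged functional pipeline: threshold every pixel to a 0/1 list, split it into rows, pad with zero rows to a multiple of 8, transpose with zip(*rows), and pack each 8-bit column chunk into a byte with sum(bit << i).
-- intended difference: On the meaningless inputs with width<0 and height<=-8, A's size formula multiplies two negatives and it returns a nonempty list of zero bytes, while B returns the empty image, the intended value for non-positive dimensions. — e.g. on convert_image(-2, -9, [], 0): A returns [0, 0], B returns []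
import Mathlib
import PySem

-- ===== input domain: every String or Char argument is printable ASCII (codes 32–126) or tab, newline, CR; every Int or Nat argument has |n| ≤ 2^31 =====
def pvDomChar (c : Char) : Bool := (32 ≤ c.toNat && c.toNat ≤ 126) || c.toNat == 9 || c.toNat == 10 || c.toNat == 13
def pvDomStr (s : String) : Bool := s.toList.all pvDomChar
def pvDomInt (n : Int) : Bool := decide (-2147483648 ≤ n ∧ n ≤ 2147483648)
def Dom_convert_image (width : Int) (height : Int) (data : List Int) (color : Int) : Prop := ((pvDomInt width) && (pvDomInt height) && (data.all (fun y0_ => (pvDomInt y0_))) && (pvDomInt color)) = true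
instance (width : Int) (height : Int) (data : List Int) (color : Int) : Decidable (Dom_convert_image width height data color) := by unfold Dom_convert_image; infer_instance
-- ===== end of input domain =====

-- B replaces A's in-place triple-nested bit-OR gather by a staged pipeline (threshold,
-- split into rows, pad, transpose, pack 8-bit chunks); on the meaningless region
-- width<0 ∧ height≤-8 A returns a nonempty zero list and B the empty image (see D_).


-- ===== PORT A =====
def convert_image (width : Int) (height : Int) (data : List Int) (color : Int) : List Int :=
  let size := PySem.Int.floordiv (width * (PySem.Int.floordiv (height + 7) 8 * 8)) 8
  let f_data := (PySem.List.pyRange 0 size).foldl (fun acc _ => acc ++ [(0 : Int)]) []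
  let byte_rows := PySem.Int.floordiv (height + 7) 8
  -- state of the two outer loops: (f_data, o); the h-loop carries a flag for Python's `break`
  -- (`0x1 << h` is ported as `(1 : Int) <<< h.toNat`, exact since h ∈ range 8 is nonnegative)
  let st := (PySem.List.pyRange 0 width).foldl (fun (st : List Int × Int) w =>
    (PySem.List.pyRange 0 byte_rows).foldl (fun (st : List Int × Int) byte_row =>
      let fd := ((PySem.List.pyRange 0 8).foldl (fun (inner : List Int × Bool) h =>
        if inner.2 then inner
        else if h + byte_row * 8 ≥ height then (inner.1, true)
        else
          let c := PySem.List.pyGetD data ((h + byte_row * 8) * width + w) 0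
          (if c > color then
             PySem.List.pySetD inner.1 st.2
               (PySem.Int.bor (PySem.List.pyGetD inner.1 st.2 0) ((1 : Int) <<< h.toNat))
           else inner.1,
           inner.2)) (st.1, false)).1
      (fd, st.2 + 1)) st) (f_data, (0 : Int))
  st.1

-- ===== PORT B =====
-- exact model of Python's zip(*rows): truncate to the shortest row (getD is safe:
-- every index drawn from the range is below every row's length)
def pyZipStar (rows : List (List Int)) : List (List Int) :=
  match rows with
  | [] => []
  | r :: rs =>
      (List.range (rs.foldl (fun m row => min m row.length) r.length)).map
        (fun i => (r :: rs).map (fun row => row.getD i 0))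

-- `[0] * width` is `List.replicate width.toNat 0` (Python yields [] for a negative count);
-- `bit << i` is `<<< p.1.toNat`, exact since enumerate starts at 0
def convert_image_alt (width : Int) (height : Int) (data : List Int) (color : Int) : List Int :=
  let byte_rows := PySem.Int.floordiv (height + 7) 8
  if width ≤ 0 ∨ byte_rows ≤ 0 then []   -- no pixels -> empty image
  else
    let bits := (PySem.List.slice data none (some (width * height))).map
        (fun v => if v > color then (1 : Int) else 0)
    let rows := (PySem.List.pyRange 0 height 1).map
          (fun r => PySem.List.slice bits (some (r * width)) (some ((r + 1) * width)))
        ++ (PySem.List.pyRange 0 (byte_rows * 8 - height) 1).map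
          (fun _ => List.replicate width.toNat (0 : Int))
    (pyZipStar rows).flatMap (fun col =>
      (PySem.List.pyRange 0 (byte_rows * 8) 8).map (fun k =>
        (PySem.List.enumerate (PySem.List.slice col (some k) (some (k + 8))) 0).foldl
          (fun s p => s + p.2 <<< p.1.toNat) 0))

-- ===== PRECONDITION & SPEC =====
-- Pre_ excludes exactly the inputs where Python A raises IndexError: with positive width and
-- height every pixel index below width*height is read, so data must be at least that long.
def Pre_convert_image (width : Int) (height : Int) (data : List Int) (color : Int) : Prop :=
  0 < width → 0 < height → width * height ≤ (data.length : Int)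
instance (width : Int) (height : Int) (data : List Int) (color : Int) : Decidable (Pre_convert_image width height data color) := by unfold Pre_convert_image; infer_instance

def pvWitness_convert_image : Int × Int × List Int × Int := (2, 3, [0, 1, 0, 1, 0, 1], 0)

-- On the meaningless inputs with width<0 and height≤-8, A's size formula multiplies two
-- negatives and it returns a nonempty list of zero bytes, while B returns the empty image,
-- the intended value for non-positive dimensions.
def D_convert_image (width : Int) (height : Int) (data : List Int) (color : Int) : Prop :=
  width < 0 ∧ height ≤ -8
instance (width : Int) (height : Int) (data : List Int) (color : Int) : Decidable (D_convert_image width height data color) := by unfold D_convert_image; infer_instance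

def Spec_convert_image (width : Int) (height : Int) (data : List Int) (color : Int) (out : List Int) : Prop := ¬ D_convert_image width height data color → out = convert_image_alt width height data color
instance (width : Int) (height : Int) (data : List Int) (color : Int) (out : List Int) : Decidable (Spec_convert_image width height data color out) := by unfold Spec_convert_image; infer_instance

def pvDiffWitness_convert_image : Int × Int × List Int × Int := (-2, -9, [], 0)
def pvDiffWitnessOut_convert_image : (List Int) × (List Int) := ([0, 0], [])

-- ===== CLAIM (what is proved, stated in full; the proofs are below) =====
def Claim_unchanged_convert_image : Prop := ∀ (width : Int) (height : Int) (data : List Int) (color : Int), Dom_convert_image width height data color → Pre_convert_image width height data color → Spec_convert_image width height data color (convert_image width height data color)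
def Claim_changed_convert_image : Prop := Dom_convert_image (pvDiffWitness_convert_image.1) (pvDiffWitness_convert_image.2.1) (pvDiffWitness_convert_image.2.2.1) (pvDiffWitness_convert_image.2.2.2) ∧ Pre_convert_image (pvDiffWitness_convert_image.1) (pvDiffWitness_convert_image.2.1) (pvDiffWitness_convert_image.2.2.1) (pvDiffWitness_convert_image.2.2.2) ∧ D_convert_image (pvDiffWitness_convert_image.1) (pvDiffWitness_convert_image.2.1) (pvDiffWitness_convert_image.2.2.1) (pvDiffWitness_convert_image.2.2.2) ∧ convert_image (pvDiffWitness_convert_image.1) (pvDiffWitness_convert_image.2.1) (pvDiffWitness_convert_image.2.2.1) (pvDiffWitness_convert_image.2.2.2) = pvDiffWitnessOut_convert_image.1 ∧ convert_image_alt (pvDiffWitness_convert_image.1) (pvDiffWitness_convert_image.2.1) (pvDiffWitness_convert_image.2.2.1) (pvDiffWitness_convert_image.2.2.2) = pvDiffWitnessOut_convert_image.2 ∧ pvDiffWitnessOut_convert_image.1 ≠ pvDiffWitnessOut_convert_image.2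
def Claim_exact_convert_image : Prop := ∀ (width : Int) (height : Int) (data : List Int) (color : Int), Dom_convert_image width height data color → Pre_convert_image width height data color → D_convert_image width height data color → convert_image width height data color ≠ convert_image_alt width height data color

-- ===== LEMMAS AND PROOFS =====

-- The common model: the output byte at column w, byte-row br, counting only rows below `lim`.
def pvBitN (data : List Int) (color : Int) (W lim br w : Nat) : Nat :=
  (List.range 8).foldl
    (fun a h => if br * 8 + h < lim ∧ data.getD ((br * 8 + h) * W + w) 0 > color then a ||| (1 <<< h) else a) 0

-- final image with byte-rows counted by BR, j = w * BR + br
def pvSpec (data : List Int) (color : Int) (W lim BR : Nat) : List Int :=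
  (List.range (W * BR)).map (fun j => ((pvBitN data color W lim (j % BR) (j / BR) : Nat) : Int))

-- generic facts ------------------------------------------------------------

theorem pvRangeNeg (s : Int) (h : s ≤ 0) : PySem.List.pyRange 0 s = [] := by
  refine List.eq_nil_iff_forall_not_mem.mpr (fun x hx => ?_)
  have := PySem.List.mem_pyRange_one.mp hx
  omega

theorem pvSetDNat (xs : List Int) (n : Nat) (v : Int) (h : n < xs.length) :
    PySem.List.pySetD xs (n : Int) v = xs.set n v := by
  simp only [PySem.List.pySetD, PySem.List.pySet?, PySem.List.pyIdx?]
  norm_num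
  simp [h]

theorem pvBorNat (v k : Nat) : PySem.Int.bor (v : Int) ((1 : Int) <<< k) = ((v ||| (1 <<< k) : Nat) : Int) := by
  rw [show (1:Int) <<< k = ((1 <<< k : Nat) : Int) from rfl, PySem.Int.bor_natCast]

theorem pvSizeEq (width height : Int) :
    PySem.Int.floordiv (width * (PySem.Int.floordiv (height + 7) 8 * 8)) 8
      = width * PySem.Int.floordiv (height + 7) 8 := by
  rw [show width * (PySem.Int.floordiv (height + 7) 8 * 8) = (width * PySem.Int.floordiv (height + 7) 8) * 8 by ring,
      PySem.Int.floordiv_eq_ediv_of_pos (by norm_num)]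
  exact Int.mul_ediv_cancel _ (by norm_num)

theorem pvGetDSet (xs : List Int) (n : Nat) (x : Int) (h : n < xs.length) :
    (xs.set n x).getD n 0 = x := by
  simp [List.getD, h]

-- break-to-skip conversion --------------------------------------------------

theorem pvFoldFlagTrue {α σ : Type} (p : α → Prop) [DecidablePred p] (f : σ → α → σ) (l : List α) (s : σ) :
    l.foldl (fun st a => if st.2 then st else if p a then (st.1, true) else (f st.1 a, st.2)) (s, true) = (s, true) := by
  induction l with
  | nil => rfl
  | cons a l ih => simpa using ih

theorem pvFoldAllStop {α σ : Type} (p : α → Prop) [DecidablePred p] (f : σ → α → σ) (l : List α) (s : σ)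
    (hall : ∀ a ∈ l, p a) :
    l.foldl (fun s a => if p a then s else f s a) s = s := by
  induction l generalizing s with
  | nil => rfl
  | cons a l ih =>
      simp only [List.foldl_cons, if_pos (hall a List.mem_cons_self)]
      exact ih s (fun b hb => hall b (List.mem_cons_of_mem a hb))

theorem pvFoldBreak {α σ : Type} (p : α → Prop) [DecidablePred p] (f : σ → α → σ) (l : List α) (s : σ)
    (hmono : l.Pairwise (fun a b => p a → p b)) :
    (l.foldl (fun st a => if st.2 then st else if p a then (st.1, true) else (f st.1 a, st.2)) (s, false)).1
      = l.foldl (fun s a => if p a then s else f s a) s := by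
  induction l generalizing s with
  | nil => rfl
  | cons a l ih =>
      rcases List.pairwise_cons.mp hmono with ⟨hhd, htl⟩
      by_cases hp : p a
      · simp only [List.foldl_cons, if_pos hp, Bool.false_eq_true, if_false, pvFoldFlagTrue]
        exact (pvFoldAllStop p f l s (fun b hb => hhd b hb hp)).symm
      · simp only [List.foldl_cons, if_neg hp, Bool.false_eq_true, if_false]
        exact ih (f s a) htl

-- A-side invariant ----------------------------------------------------------

-- the first m output bytes filled in, the rest still zero
def pvPre (data : List Int) (color : Int) (W H BR m : Nat) : List Int :=
  (List.range m).map (fun j => ((pvBitN data color W H (j % BR) (j / BR) : Nat) : Int))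
    ++ List.replicate (W * BR - m) 0

theorem pvPreLen (data : List Int) (color : Int) (W H BR m : Nat) (hm : m ≤ W * BR) :
    (pvPre data color W H BR m).length = W * BR := by
  simp [pvPre]; omega

theorem pvPreGetD (data : List Int) (color : Int) (W H BR m : Nat) (hm : m < W * BR) :
    (pvPre data color W H BR m).getD m 0 = 0 := by
  have hrep : W * BR - m = (W * BR - m - 1) + 1 := by omega
  rw [pvPre, hrep, List.replicate_succ]
  rw [List.getD_eq_getElem?_getD, List.getElem?_append_right (by simp)]
  simp

theorem pvPreSet (data : List Int) (color : Int) (W H BR m : Nat) (hm : m < W * BR) :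
    (pvPre data color W H BR m).set m ((pvBitN data color W H (m % BR) (m / BR) : Nat) : Int)
      = pvPre data color W H BR (m + 1) := by
  have hrep : W * BR - m = (W * BR - m - 1) + 1 := by omega
  rw [pvPre, hrep, List.replicate_succ, List.set_append_right _ _ (by simp)]
  simp only [List.length_map, List.length_range, Nat.sub_self, List.set_cons_zero]
  rw [pvPre, List.range_succ, List.map_append]
  simp only [List.map_singleton]
  rw [List.append_cons]
  congr 2

theorem pvASkip (data : List Int) (color : Int) (W H br wk : Nat) (hs : List Nat) :
    ∀ (fd : List Int) (o v : Nat), o < fd.length → fd.getD o 0 = (v : Int) →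
      hs.foldl (fun (fd : List Int) (h : Nat) =>
          if ((h : Int) + (br : Int) * 8 ≥ (H : Int)) then fd
          else
            if PySem.List.pyGetD data (((h : Int) + (br : Int) * 8) * (W : Int) + (wk : Int)) 0 > color then
              PySem.List.pySetD fd ((o : Nat) : Int)
                (PySem.Int.bor (PySem.List.pyGetD fd ((o : Nat) : Int) 0) ((1 : Int) <<< ((h : Int)).toNat))
            else fd) fd
        = fd.set o
            ((hs.foldl (fun a h => if br * 8 + h < H ∧ data.getD ((br * 8 + h) * W + wk) 0 > color then a ||| (1 <<< h) else a) v : Nat) : Int) := by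
  induction hs with
  | nil =>
      intro fd o v ho hv
      simp only [List.foldl_nil]
      rw [← hv, List.getD_eq_getElem _ _ ho, List.set_getElem_self ho]
  | cons h t ih =>
      intro fd o v ho hv
      have hidx : ((h : Int) + (br : Int) * 8) * (W : Int) + (wk : Int) = (((br * 8 + h) * W + wk : Nat) : Int) := by
        push_cast; ring
      simp only [List.foldl_cons]
      by_cases hstop : br * 8 + h < H
      · rw [if_neg (by omega : ¬ ((h : Int) + (br : Int) * 8 ≥ (H : Int)))]
        rw [hidx, PySem.List.pyGetD_natCast, PySem.List.pyGetD_natCast]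
        by_cases hpix : data.getD ((br * 8 + h) * W + wk) 0 > color
        · rw [if_pos hpix, if_pos ⟨hstop, hpix⟩, hv, Int.toNat_natCast, pvBorNat,
              pvSetDNat _ _ _ ho]
          rw [ih (fd.set o _) o (v ||| (1 <<< h)) (by simpa using ho) (pvGetDSet _ _ _ ho)]
          rw [List.set_set]
        · rw [if_neg hpix, if_neg (fun hc => hpix hc.2)]
          exact ih fd o v ho hv
      · rw [if_pos (by omega : ((h : Int) + (br : Int) * 8 ≥ (H : Int))), if_neg (by omega)]
        exact ih fd o v ho hv

def pvABody (data : List Int) (color : Int) (W H BR wk : Nat) : (List Int × Int) → Nat → (List Int × Int) :=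
  fun st br =>
    (((List.range 8).foldl (fun (inner : List Int × Bool) (h : Nat) =>
        if inner.2 then inner
        else if (h : Int) + (br : Int) * 8 ≥ (H : Int) then (inner.1, true)
        else ((if PySem.List.pyGetD data (((h : Int) + (br : Int) * 8) * (W : Int) + ((wk : Nat) : Int)) 0 > color then
                 PySem.List.pySetD inner.1 st.2 (PySem.Int.bor (PySem.List.pyGetD inner.1 st.2 0) ((1 : Int) <<< ((h : Int)).toNat))
               else inner.1), inner.2)) (st.1, false)).1,
     st.2 + 1)

theorem pvAStep (data : List Int) (color : Int) (W H BR k m : Nat) (hm : m < BR) (ho : k * BR + m < W * BR) :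
    pvABody data color W H BR k (pvPre data color W H BR (k * BR + m), ((k * BR + m : Nat) : Int)) m
      = (pvPre data color W H BR (k * BR + m + 1), ((k * BR + m + 1 : Nat) : Int)) := by
  have hlen : k * BR + m < (pvPre data color W H BR (k * BR + m)).length := by
    rw [pvPreLen _ _ _ _ _ _ (by omega)]; omega
  have hmono : (List.range 8).Pairwise
      (fun (a b : Nat) => ((a : Int) + (m : Int) * 8 ≥ (H : Int)) → ((b : Int) + (m : Int) * 8 ≥ (H : Int))) := by
    refine (List.pairwise_lt_range).imp ?_
    intro a b hab h1
    have : (a : Int) ≤ (b : Int) := by exact_mod_cast Nat.le_of_lt hab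
    omega
  unfold pvABody
  simp only
  rw [pvFoldBreak (fun (h : Nat) => ((h : Int) + (m : Int) * 8 ≥ (H : Int)))
        (fun (fd : List Int) (h : Nat) =>
          if PySem.List.pyGetD data (((h : Int) + (m : Int) * 8) * (W : Int) + ((k : Nat) : Int)) 0 > color then
            PySem.List.pySetD fd ((k * BR + m : Nat) : Int)
              (PySem.Int.bor (PySem.List.pyGetD fd ((k * BR + m : Nat) : Int) 0) ((1 : Int) <<< ((h : Int)).toNat))
          else fd)
        (List.range 8) _ hmono]
  rw [pvASkip data color W H m k (List.range 8) _ (k * BR + m) 0 hlen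
        (pvPreGetD data color W H BR (k * BR + m) ho)]
  have hdm : pvBitN data color W H ((k * BR + m) % BR) ((k * BR + m) / BR) = pvBitN data color W H m k := by
    have h1 : (k * BR + m) % BR = m := by
      rw [Nat.mul_comm, Nat.mul_add_mod, Nat.mod_eq_of_lt hm]
    have h2 : (k * BR + m) / BR = k := by
      rw [Nat.mul_comm, Nat.mul_add_div (by omega : 0 < BR), Nat.div_eq_of_lt hm, Nat.add_zero]
    rw [h1, h2]
  refine Prod.ext ?_ ?_
  · rw [show (List.foldl (fun a h => if m * 8 + h < H ∧ data.getD ((m * 8 + h) * W + k) 0 > color then a ||| 1 <<< h else a) 0 (List.range 8)) = pvBitN data color W H m k from rfl]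
    rw [← hdm]
    exact pvPreSet data color W H BR (k * BR + m) ho
  · push_cast; ring

theorem pvAMiddle (data : List Int) (color : Int) (W H BR k : Nat) (hk : k < W) :
    ∀ m, m ≤ BR →
      (List.range m).foldl (pvABody data color W H BR k)
          (pvPre data color W H BR (k * BR), ((k * BR : Nat) : Int))
        = (pvPre data color W H BR (k * BR + m), ((k * BR + m : Nat) : Int)) := by
  intro m
  induction m with
  | zero => intro _; simp
  | succ m ih =>
      intro hm
      rw [List.range_succ, List.foldl_append, ih (by omega), List.foldl_cons, List.foldl_nil]
      exact pvAStep data color W H BR k m (by omega) (by nlinarith)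

theorem pvAOuter (data : List Int) (color : Int) (W H BR : Nat) :
    ∀ k, k ≤ W →
      (List.range k).foldl (fun (st : List Int × Int) (w : Nat) =>
          (List.range BR).foldl (pvABody data color W H BR w) st)
        (pvPre data color W H BR 0, (0 : Int))
      = (pvPre data color W H BR (k * BR), ((k * BR : Nat) : Int)) := by
  intro k
  induction k with
  | zero => intro _; simp [pvPre]
  | succ k ih =>
      intro hk
      rw [List.range_succ, List.foldl_append, ih (by omega), List.foldl_cons, List.foldl_nil]
      rw [pvAMiddle data color W H BR k (by omega) BR (le_refl _)]
      congr 2 <;> ring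

theorem pvZeroFold (l : List Int) : ∀ acc : List Int,
    l.foldl (fun acc _ => acc ++ [(0 : Int)]) acc = acc ++ List.replicate l.length 0 := by
  induction l with
  | nil => intro acc; simp
  | cons x l ih =>
      intro acc
      rw [List.foldl_cons, ih]
      simp [List.replicate_succ]

theorem pvPreZero (data : List Int) (color : Int) (W H BR : Nat) :
    pvPre data color W H BR 0 = List.replicate (W * BR) 0 := by
  simp [pvPre]

theorem pvPreFull (data : List Int) (color : Int) (W H BR : Nat) :
    pvPre data color W H BR (W * BR) = pvSpec data color W H BR := by
  simp [pvPre, pvSpec]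

theorem pvRange8 : PySem.List.pyRange 0 8 = (List.range 8).map (fun k : Nat => (k : Int)) := by decide

theorem pvRangeLen (n : Nat) : (PySem.List.pyRange 0 (n : Int)).length = n := by
  rw [PySem.List.pyRange_zero_natCast]; simp

theorem pvAMain (data : List Int) (color : Int) (W H : Nat) :
    convert_image (W : Int) (H : Int) data color = pvSpec data color W H ((H + 7) / 8) := by
  have hbr : PySem.Int.floordiv ((H : Int) + 7) 8 = (((H + 7) / 8 : Nat) : Int) := by
    rw [show ((H : Int) + 7) = ((H + 7 : Nat) : Int) by push_cast; ring,
        show (8 : Int) = ((8 : Nat) : Int) from rfl, PySem.Int.floordiv_natCast]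
  have hsz : PySem.Int.floordiv ((W : Int) * ((((H + 7) / 8 : Nat) : Int) * 8)) 8
      = ((W * ((H + 7) / 8) : Nat) : Int) := by
    rw [show (W : Int) * ((((H + 7) / 8 : Nat) : Int) * 8) = ((W : Int) * (((H + 7) / 8 : Nat) : Int)) * 8 by ring,
        PySem.Int.floordiv_eq_ediv_of_pos (by norm_num), Int.mul_ediv_cancel _ (by norm_num)]
    push_cast; ring
  unfold convert_image
  simp only [hbr, hsz]
  rw [pvZeroFold, pvRangeLen]
  rw [← pvPreZero data color W H ((H + 7) / 8)]
  rw [PySem.List.pyRange_zero_natCast W, List.foldl_map]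
  simp only [PySem.List.pyRange_zero_natCast ((H + 7) / 8), List.foldl_map, pvRange8]
  simp only [List.nil_append]
  show ((List.range W).foldl (fun (st : List Int × Int) (w : Nat) =>
      (List.range ((H + 7) / 8)).foldl (pvABody data color W H ((H + 7) / 8) w) st)
    (pvPre data color W H ((H + 7) / 8) 0, (0 : Int))).1 = pvSpec data color W H ((H + 7) / 8)
  rw [pvAOuter data color W H ((H + 7) / 8) W (le_refl W)]
  exact pvPreFull data color W H ((H + 7) / 8)

-- A on negative width/height: the untouched zero list ------------------------

theorem pvRangeLenInt (s : Int) : (PySem.List.pyRange 0 s).length = s.toNat := by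
  by_cases hs : 0 ≤ s
  · obtain ⟨n, rfl⟩ : ∃ n : Nat, s = (n : Int) := ⟨s.toNat, by omega⟩
    rw [pvRangeLen]; omega
  · rw [pvRangeNeg s (by omega)]; simp; omega

theorem pvBrNonpos (height : Int) (hh : height < 0) : PySem.Int.floordiv (height + 7) 8 ≤ 0 := by
  rw [PySem.Int.floordiv_eq_ediv_of_pos (by norm_num)]
  omega

theorem pvANeg (width height : Int) (data : List Int) (color : Int)
    (h : width < 0 ∨ height < 0) :
    convert_image width height data color
      = List.replicate (width * PySem.Int.floordiv (height + 7) 8).toNat 0 := by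
  unfold convert_image
  simp only [pvSizeEq]
  rw [pvZeroFold, pvRangeLenInt, List.nil_append]
  rcases h with hw | hh
  · rw [pvRangeNeg width (by omega), List.foldl_nil]
  · rw [pvRangeNeg _ (pvBrNonpos height hh)]
    simp only [List.foldl_nil]
    rw [List.foldl_fixed]

-- B-side lemmas --------------------------------------------------------------

theorem pvFoldMinConst (rs : List (List Int)) (W : Nat) (h : ∀ row ∈ rs, row.length = W) :
    rs.foldl (fun m row => min m row.length) W = W := by
  induction rs with
  | nil => rfl
  | cons r rs ih =>
      rw [List.foldl_cons, h r List.mem_cons_self, min_self]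
      exact ih (fun row hr => h row (List.mem_cons_of_mem r hr))

theorem pvZipStarEq (r : List Int) (rs : List (List Int)) (W : Nat)
    (hlen : ∀ row ∈ r :: rs, row.length = W) :
    pyZipStar (r :: rs) = (List.range W).map (fun i => (r :: rs).map (fun row => row.getD i 0)) := by
  show (List.range (rs.foldl (fun m row => min m row.length) r.length)).map
      (fun i => (r :: rs).map (fun row => row.getD i 0)) = _
  rw [hlen r List.mem_cons_self,
      pvFoldMinConst rs W (fun row hr => hlen row (List.mem_cons_of_mem r hr))]

-- the packed byte: OR of distinct bits equals the sum of the bits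
theorem pvOrSum8 (c : Nat → Prop) [DecidablePred c] :
    (((List.range 8).foldl (fun a h => if c h then a ||| (1 <<< h) else a) 0 : Nat) : Int)
      = (List.range 8).foldl (fun s i => s + (if c i then (1 : Int) else 0) <<< i) 0 := by
  have h8 : List.range 8 = [0, 1, 2, 3, 4, 5, 6, 7] := rfl
  rw [h8]
  simp only [List.foldl_cons, List.foldl_nil]
  by_cases h0 : c 0 <;> by_cases h1 : c 1 <;> by_cases h2 : c 2 <;> by_cases h3 : c 3 <;>
    by_cases h4 : c 4 <;> by_cases h5 : c 5 <;> by_cases h6 : c 6 <;> by_cases h7 : c 7 <;>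
      simp [h0, h1, h2, h3, h4, h5, h6, h7] <;> decide

-- the enumerate-and-sum fold over an 8-element chunk, written out
theorem pvEnumFold8 (v : Nat → Int) :
    (PySem.List.enumerate ((List.range 8).map v) 0).foldl (fun s p => s + p.2 <<< p.1.toNat) 0
      = (List.range 8).foldl (fun s i => s + v i <<< i) 0 := by
  have h8 : List.range 8 = [0, 1, 2, 3, 4, 5, 6, 7] := rfl
  rw [h8]
  simp only [List.map_cons, List.map_nil, PySem.List.enumerate_cons, PySem.List.enumerate_nil,
    List.foldl_cons, List.foldl_nil]
  norm_num
  rfl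

-- the slice of an 8-chunk out of a column
theorem pvChunkSlice (g : Nat → Int) (N br : Nat) (hbr : br * 8 + 8 ≤ N) :
    PySem.List.slice ((List.range N).map g) (some ((br * 8 : Nat) : Int)) (some (((br * 8 : Nat) : Int) + 8))
      = (List.range 8).map (fun i => g (br * 8 + i)) := by
  rw [PySem.List.slice_toNat _ (by positivity) (by positivity)]
  have ha : ((br * 8 : Nat) : Int).toNat = br * 8 := by omega
  have hb : (((br * 8 : Nat) : Int) + 8).toNat = br * 8 + 8 := by omega
  rw [ha, hb, show br * 8 + 8 - br * 8 = 8 by omega]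
  apply List.ext_getElem
  · simp; omega
  · intro i h1 h2
    simp only [List.getElem_take, List.getElem_drop, List.getElem_map, List.getElem_range]

-- the output bytes of one column equal pvBitN
theorem pvChunkVal (data : List Int) (color : Int) (W H BR br x : Nat) (hbr : br < BR) :
    (PySem.List.enumerate
        (PySem.List.slice
          ((List.range (BR * 8)).map (fun r => if r < H ∧ data.getD (r * W + x) 0 > color then (1 : Int) else 0))
          (some ((br * 8 : Nat) : Int)) (some (((br * 8 : Nat) : Int) + 8))) 0).foldl
        (fun s p => s + p.2 <<< p.1.toNat) 0
      = ((pvBitN data color W H br x : Nat) : Int) := by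
  rw [pvChunkSlice _ (BR * 8) br (by nlinarith), pvEnumFold8]
  rw [show pvBitN data color W H br x
      = (List.range 8).foldl
          (fun a h => if br * 8 + h < H ∧ data.getD ((br * 8 + h) * W + x) 0 > color then a ||| (1 <<< h) else a) 0
      from rfl]
  rw [pvOrSum8 (fun h => br * 8 + h < H ∧ data.getD ((br * 8 + h) * W + x) 0 > color)]

-- flatten a column-major double loop into a single indexed map
theorem pvFlatten (F : Nat → Nat → Int) (W BR : Nat) :
    (List.range W).flatMap (fun x => (List.range BR).map (fun br => F x br))
      = (List.range (W * BR)).map (fun j => F (j / BR) (j % BR)) := by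
  induction W with
  | zero => simp
  | succ W ih =>
      rw [List.range_succ, List.flatMap_append, ih,
          show (W + 1) * BR = W * BR + BR by ring, List.range_add, List.map_append, List.map_map]
      congr 1
      · simp only [List.flatMap_cons, List.flatMap_nil, List.append_nil]
        refine List.map_congr_left ?_
        intro m hm
        have hm' : m < BR := List.mem_range.mp hm
        have hBR : 0 < BR := by omega
        have h1 : (W * BR + m) / BR = W := by
          rw [Nat.mul_comm W BR, Nat.mul_add_div hBR, Nat.div_eq_of_lt hm', Nat.add_zero]
        have h2 : (W * BR + m) % BR = m := by
          rw [Nat.mul_comm W BR, Nat.mul_add_mod, Nat.mod_eq_of_lt hm']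
        simp [Function.comp, h1, h2]

-- one image row, as the port's slice of the thresholded pixel list
theorem pvRowEq (data : List Int) (color : Int) (W H r : Nat)
    (hlen : W * H ≤ data.length) (hr : r < H) :
    PySem.List.slice ((data.take (W * H)).map (fun v => if v > color then (1 : Int) else 0))
        (some ((r : Int) * (W : Int))) (some (((r : Int) + 1) * (W : Int)))
      = (List.range W).map (fun x => if r < H ∧ data.getD (r * W + x) 0 > color then (1 : Int) else 0) := by
  have hrw : r * W + W ≤ W * H := by
    have h1 : (r + 1) * W ≤ H * W := Nat.mul_le_mul_right W hr
    rw [Nat.succ_mul] at h1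
    rw [Nat.mul_comm W H]
    exact h1
  rw [show (r : Int) * (W : Int) = ((r * W : Nat) : Int) by push_cast; ring,
      show ((r : Int) + 1) * (W : Int) = ((r * W : Nat) : Int) + ((W : Nat) : Int) by push_cast; ring,
      PySem.List.slice_natCast_add]
  apply List.ext_getElem
  · simp
    omega
  · intro x h1 h2
    have hxW : x < W := by simpa using h2
    have hidx : r * W + x < data.length := by omega
    have hidx2 : r * W + x < W * H := by omega
    simp only [List.getElem_take, List.getElem_drop, List.getElem_map, List.getElem_range]
    rw [List.getD_eq_getElem data 0 hidx]
    simp only [hr, true_and]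

-- zip(*rows) of uniformly shaped rows is the transpose
theorem pvZipStarMap (N W : Nat) (g : Nat → Nat → Int) (hN : N ≠ 0) :
    pyZipStar ((List.range N).map (fun r => (List.range W).map (g r)))
      = (List.range W).map (fun x => (List.range N).map (fun r => g r x)) := by
  obtain ⟨M, rfl⟩ : ∃ M, N = M + 1 := ⟨N - 1, by omega⟩
  rw [List.range_succ_eq_map, List.map_cons]
  rw [pvZipStarEq _ _ W (by
    intro row hrow
    rcases List.mem_cons.mp hrow with rfl | hmem
    · simp
    · rcases List.mem_map.mp hmem with ⟨r, _, rfl⟩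
      simp)]
  refine List.map_congr_left ?_
  intro i hi
  have hiW := List.mem_range.mp hi
  rw [List.map_cons, List.map_cons]
  simp only [List.map_map]
  congr 1
  · exact PySem.List.getD_map_range (g 0) W i 0 hiW
  · refine List.map_congr_left ?_
    intro r _
    simp only [Function.comp]
    exact PySem.List.getD_map_range (g r.succ) W i 0 hiW

-- range(0, byte_rows*8, 8) enumerates the byte rows
theorem pvKRange (BR : Nat) :
    PySem.List.pyRange 0 ((BR : Int) * 8) 8 = (List.range BR).map (fun br => ((br * 8 : Nat) : Int)) := by
  rw [PySem.List.pyRange_of_pos _ _ (by norm_num : (0 : Int) < 8)]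
  by_cases h : BR = 0
  · subst h; simp
  · rw [if_pos (by omega : (0 : Int) < (BR : Int) * 8),
        show (((BR : Int) * 8 - 0 + 8 - 1) / 8).toNat = BR by omega]
    refine List.map_congr_left ?_
    intro k _
    push_cast
    ring

-- the main positive case for B
theorem pvBMain (data : List Int) (color : Int) (W H : Nat)
    (hlen : W * H ≤ data.length) :
    convert_image_alt (W : Int) (H : Int) data color = pvSpec data color W H ((H + 7) / 8) := by
  have hbr : PySem.Int.floordiv ((H : Int) + 7) 8 = (((H + 7) / 8 : Nat) : Int) := by
    rw [show ((H : Int) + 7) = ((H + 7 : Nat) : Int) by push_cast; ring,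
        show (8 : Int) = ((8 : Nat) : Int) from rfl, PySem.Int.floordiv_natCast]
  set BR := (H + 7) / 8 with hBRdef
  have hHle : H ≤ BR * 8 := by omega
  simp only [convert_image_alt, hbr]
  by_cases hcond : (W : Int) ≤ 0 ∨ ((BR : Nat) : Int) ≤ 0
  · rw [if_pos hcond]
    have hz : W * BR = 0 := by
      rcases hcond with h | h
      · have h0 : W = 0 := by omega
        simp [h0]
      · have h0 : BR = 0 := by omega
        simp [h0]
    show ([] : List Int) = pvSpec data color W H BR
    unfold pvSpec
    rw [hz]
    rfl
  rw [if_neg hcond]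
  rw [not_or] at hcond
  have hH : H ≠ 0 := by
    rcases hcond with ⟨_, hbrpos⟩
    intro h0
    rw [h0] at hBRdef
    omega
  rw [show (W : Int) * (H : Int) = ((W * H : Nat) : Int) by push_cast; ring,
      PySem.List.slice_to_natCast,
      show ((BR : Nat) : Int) * 8 - (H : Int) = ((BR * 8 - H : Nat) : Int) by omega,
      PySem.List.pyRange_zero_natCast H, PySem.List.pyRange_zero_natCast (BR * 8 - H),
      List.map_map, List.map_map]
  have hrows :
      (List.range H).map ((fun r => PySem.List.slice ((data.take (W * H)).map (fun v => if v > color then (1 : Int) else 0)) (some (r * (W : Int))) (some ((r + 1) * (W : Int)))) ∘ (fun k : Nat => (k : Int)))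
        ++ (List.range (BR * 8 - H)).map ((fun _ => List.replicate ((W : Int)).toNat (0 : Int)) ∘ (fun k : Nat => (k : Int)))
      = (List.range (BR * 8)).map (fun r => (List.range W).map
          (fun x => if r < H ∧ data.getD (r * W + x) 0 > color then (1 : Int) else 0)) := by
    conv_rhs => rw [show BR * 8 = H + (BR * 8 - H) by omega, List.range_add, List.map_append, List.map_map]
    congr 1
    · refine List.map_congr_left ?_
      intro r hrm
      have hr : r < H := List.mem_range.mp hrm
      simp only [Function.comp]
      exact pvRowEq data color W H r hlen hr
    · refine List.map_congr_left ?_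
      intro j _
      simp only [Function.comp, Int.toNat_natCast]
      rw [show (List.range W).map (fun x => if H + j < H ∧ data.getD ((H + j) * W + x) 0 > color then (1 : Int) else 0)
            = (List.range W).map (fun _ => (0 : Int)) from
          List.map_congr_left (fun x _ => by rw [if_neg (by omega)]),
        List.map_const', List.length_range]
  rw [hrows]
  have hN : BR * 8 ≠ 0 := by omega
  rw [pvZipStarMap (BR * 8) W _ hN, List.flatMap_map]
  have hinner : ∀ x : Nat,
      (PySem.List.pyRange 0 ((BR : Int) * 8) 8).map (fun k =>
        (PySem.List.enumerate (PySem.List.slice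
            ((List.range (BR * 8)).map (fun r => if r < H ∧ data.getD (r * W + x) 0 > color then (1 : Int) else 0))
            (some k) (some (k + 8))) 0).foldl (fun s p => s + p.2 <<< p.1.toNat) 0)
        = (List.range BR).map (fun br => ((pvBitN data color W H br x : Nat) : Int)) := by
    intro x
    rw [pvKRange BR, List.map_map]
    refine List.map_congr_left ?_
    intro br hbrm
    exact pvChunkVal data color W H BR br x (List.mem_range.mp hbrm)
  calc (List.range W).flatMap (fun x =>
          (PySem.List.pyRange 0 ((BR : Int) * 8) 8).map (fun k =>
            (PySem.List.enumerate (PySem.List.slice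
                ((List.range (BR * 8)).map (fun r => if r < H ∧ data.getD (r * W + x) 0 > color then (1 : Int) else 0))
                (some k) (some (k + 8))) 0).foldl (fun s p => s + p.2 <<< p.1.toNat) 0))
      = (List.range W).flatMap (fun x => (List.range BR).map (fun br => ((pvBitN data color W H br x : Nat) : Int))) :=
        congrArg (fun f => List.flatMap f (List.range W)) (funext hinner)
    _ = pvSpec data color W H BR := by
        rw [pvFlatten (fun x br => ((pvBitN data color W H br x : Nat) : Int)) W BR]
        rfl

-- B's empty-image early-out
theorem pvBNil (width height : Int) (data : List Int) (color : Int)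
    (h : width ≤ 0 ∨ PySem.Int.floordiv (height + 7) 8 ≤ 0) :
    convert_image_alt width height data color = [] := by
  simp only [convert_image_alt]
  rw [if_pos h]

-- ===== VERDICT (by name: the statement is the Claim_ definition above) =====
theorem convert_image_spec : Claim_unchanged_convert_image := by
  intro width height data color _ hpre hnd
  unfold Pre_convert_image at hpre
  unfold D_convert_image at hnd
  by_cases hw : 0 ≤ width
  · by_cases hh : 0 ≤ height
    · obtain ⟨W, rfl⟩ : ∃ W : Nat, width = (W : Int) := ⟨width.toNat, by omega⟩
      obtain ⟨H, rfl⟩ : ∃ H : Nat, height = (H : Int) := ⟨height.toNat, by omega⟩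
      have hlen : W * H ≤ data.length := by
        by_cases hW0 : W = 0
        · simp [hW0]
        by_cases hH0 : H = 0
        · simp [hH0]
        have := hpre (by exact_mod_cast Nat.pos_of_ne_zero hW0) (by exact_mod_cast Nat.pos_of_ne_zero hH0)
        push_cast at this ⊢
        omega
      rw [pvAMain, pvBMain data color W H hlen]
    · -- height < 0, width ≥ 0
      rw [pvANeg _ _ _ _ (Or.inr (by omega)), pvBNil _ _ _ _ (Or.inr (pvBrNonpos height (by omega)))]
      have := pvBrNonpos height (by omega)
      rw [show (width * PySem.Int.floordiv (height + 7) 8).toNat = 0 by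
            have : width * PySem.Int.floordiv (height + 7) 8 ≤ 0 := by
              exact mul_nonpos_of_nonneg_of_nonpos hw this
            omega]
      rfl
  · -- width < 0: with ¬D we have -8 < height, so byte_rows ≥ 0 and both sides are []
    have hh8 : -8 < height := by
      by_contra hcon
      exact hnd ⟨by omega, by omega⟩
    have hbr0 : 0 ≤ PySem.Int.floordiv (height + 7) 8 := by
      rw [PySem.Int.floordiv_eq_ediv_of_pos (by norm_num)]
      omega
    rw [pvANeg _ _ _ _ (Or.inl (by omega)), pvBNil _ _ _ _ (Or.inl (by omega))]
    have hle : width * PySem.Int.floordiv (height + 7) 8 ≤ 0 :=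
      mul_nonpos_of_nonpos_of_nonneg (by omega) hbr0
    rw [show (width * PySem.Int.floordiv (height + 7) 8).toNat = 0 by omega]
    rfl

theorem convert_image_changed : Claim_changed_convert_image := by
  unfold Claim_changed_convert_image; decide

theorem convert_image_tight : Claim_exact_convert_image := by
  intro width height data color _ _ hd
  obtain ⟨hw, hh⟩ := hd
  have hbr : PySem.Int.floordiv (height + 7) 8 ≤ -1 := by
    rw [PySem.Int.floordiv_eq_ediv_of_pos (by norm_num)]
    omega
  rw [pvANeg _ _ _ _ (Or.inl hw), pvBNil _ _ _ _ (by omega)]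
  have hpos : 0 < width * PySem.Int.floordiv (height + 7) 8 :=
    mul_pos_of_neg_of_neg (by omega) (by omega)
  intro hcon
  have hlen := congrArg List.length hcon
  rw [List.length_replicate, List.length_nil] at hlen
  omega
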